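-- pv_equiv track=rewrite | github.com/ntsee/clip-fault-injections | generate_deterministic_fault_maps.py | generate_fault_map
-- ===== SOURCE A (Python) =====
-- def generate_fault_map(encoder, block_index, group, weights):
--     output = {}
--     for x, y, weight, sub_group in weights:
--         name = f'{encoder}.encoder.layers.{block_index}.{group}.{sub_group}._packed_params._packed_params'
--         if name not in output:
--             output[name] = []
--         output[name].append((x, y))
--     return output
-- ===== SOURCE B (Python) =====
-- def generate_fault_map(encoder, block_index, group, weights):
--     subs = dict.fromkeys(sg for _, _, _, sg in weights)
--     return {f'{encoder}.encoder.layers.{block_index}.{group}.{sg}._packed_params._packed_params':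
--                 [(x, y) for x, y, _, g in weights if g == sg]
--             for sg in subs}
-- ===== Notes on version B (the rewrite author's own statement) =====
-- stated objective: alternative
-- what changed: A grows a dict in one pass, creating-then-appending to each key's bucket; B first deduplicates the sub_group values (dict.fromkeys) and then builds the result with one dict comprehension, collecting each group's (x, y) pairs by a per-group filtering comprehension.
import Mathlib
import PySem

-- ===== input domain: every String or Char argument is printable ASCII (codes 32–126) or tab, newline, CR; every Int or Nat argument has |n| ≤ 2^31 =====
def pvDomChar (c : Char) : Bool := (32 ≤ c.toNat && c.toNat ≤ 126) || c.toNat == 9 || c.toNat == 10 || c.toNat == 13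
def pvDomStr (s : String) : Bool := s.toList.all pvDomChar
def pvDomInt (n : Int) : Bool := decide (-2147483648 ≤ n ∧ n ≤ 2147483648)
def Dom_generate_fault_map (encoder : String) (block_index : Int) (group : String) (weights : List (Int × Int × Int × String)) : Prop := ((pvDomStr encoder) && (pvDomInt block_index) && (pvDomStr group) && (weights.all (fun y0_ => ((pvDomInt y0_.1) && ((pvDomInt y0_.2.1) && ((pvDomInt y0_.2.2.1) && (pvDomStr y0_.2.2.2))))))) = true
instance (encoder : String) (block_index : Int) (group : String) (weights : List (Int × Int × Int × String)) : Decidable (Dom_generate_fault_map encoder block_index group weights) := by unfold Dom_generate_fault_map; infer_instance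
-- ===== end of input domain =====

-- B replaces A's grow-a-dict-as-you-go loop by "dedup the sub_groups, then one comprehension per
-- group" (a different decomposition of the same grouping; objective: alternative, not faster).

-- the f-string both programs build (Python: f'{encoder}.encoder.layers.{block_index}.{group}.{sub_group}._packed_params._packed_params')
def pvName (encoder : String) (block_index : Int) (group : String) (sub_group : String) : String :=
  PySem.Str.join "" [encoder, ".encoder.layers.", PySem.Int.toStr block_index, ".", group, ".",
    sub_group, "._packed_params._packed_params"]

-- ===== PORT A =====
def generate_fault_map (encoder : String) (block_index : Int) (group : String) (weights : List (Int × Int × Int × String)) : List (String × List (Int × Int)) :=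
  (weights.foldl
    (fun output t =>
      let name := pvName encoder block_index group t.2.2.2
      let output := if output.contains name then output else output.insert name ([] : List (Int × Int))
      output.modify name [] (fun l => l ++ [(t.1, t.2.1)]))
    PySem.Dict.empty).items

-- ===== PORT B =====
-- dict.fromkeys on the sub_groups = ordered dedup (PySem.List.dedup); the dict comprehension's keys
-- are distinct (one per sub_group), so it is the list of its entries in order.
def generate_fault_map_alt (encoder : String) (block_index : Int) (group : String) (weights : List (Int × Int × Int × String)) : List (String × List (Int × Int)) :=
  let subs := PySem.List.dedup (weights.map (fun t => t.2.2.2))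
  subs.map (fun sg =>
    (pvName encoder block_index group sg,
     (weights.filter (fun t => t.2.2.2 == sg)).map (fun t => (t.1, t.2.1))))

-- ===== PRECONDITION & SPEC =====
def Spec_generate_fault_map (encoder : String) (block_index : Int) (group : String) (weights : List (Int × Int × Int × String)) (out : List (String × List (Int × Int))) : Prop := out = generate_fault_map_alt encoder block_index group weights
instance (encoder : String) (block_index : Int) (group : String) (weights : List (Int × Int × Int × String)) (out : List (String × List (Int × Int))) : Decidable (Spec_generate_fault_map encoder block_index group weights out) := by unfold Spec_generate_fault_map; infer_instance

-- ===== CLAIM (what is proved, stated in full; the proofs are below) =====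
def Claim_equal_generate_fault_map : Prop := ∀ (encoder : String) (block_index : Int) (group : String) (weights : List (Int × Int × Int × String)), Dom_generate_fault_map encoder block_index group weights → Spec_generate_fault_map encoder block_index group weights (generate_fault_map encoder block_index group weights)

-- ===== LEMMAS AND PROOFS =====

-- the name string determines the sub_group (fixed prefix and suffix cancel)
theorem pvName_inj (encoder : String) (block_index : Int) (group : String) {s t : String}
    (h : pvName encoder block_index group s = pvName encoder block_index group t) : s = t := by
  apply String.toList_inj.mp
  have h2 := congrArg String.toList h
  simp [pvName, PySem.Str.join, PySem.Chars.join, List.intercalate, List.intersperse] at h2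
  exact h2

-- A's loop body ("if absent, insert []; then append") is one Dict.modify
theorem step_eq_modify {κ : Type} [BEq κ] [LawfulBEq κ] (d : PySem.Dict κ (List (Int × Int)))
    (n : κ) (p : Int × Int) :
    (if d.contains n then d else d.insert n ([] : List (Int × Int))).modify n [] (fun l => l ++ [p])
      = d.modify n [] (fun l => l ++ [p]) := by
  by_cases h : d.contains n
  · simp [h]
  · simp only [h, Bool.false_eq_true, if_false, PySem.Dict.modify,
      PySem.Dict.getD_insert_self, PySem.Dict.insert_insert_self,
      PySem.Dict.getD_of_not_contains d _ (Bool.not_eq_true _ ▸ h)]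

-- ordered dedup commutes with an injective map
theorem set_update_map_inj {α β : Type} [BEq α] [LawfulBEq α] [BEq β] [LawfulBEq β]
    (f : α → β) (hf : ∀ {a b : α}, f a = f b → a = b) (l : List α) (acc : List α) :
    PySem.Set.update (acc.map f) (l.map f) = (PySem.Set.update acc l).map f := by
  induction l generalizing acc with
  | nil => rfl
  | cons x xs ih =>
    have hc : PySem.Set.contains (acc.map f) (f x) = PySem.Set.contains acc x := by
      simp only [PySem.Set.contains]
      by_cases hx : x ∈ acc
      · simp [hx]
        exact ⟨x, hx, rfl⟩
      · simp [hx]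
        intro a ha hfa
        exact hx (hf hfa ▸ ha)
    have hadd : PySem.Set.add (acc.map f) (f x) = (PySem.Set.add acc x).map f := by
      rw [PySem.Set.add, PySem.Set.add, hc]
      by_cases hx2 : x ∈ acc <;> simp [hx2]
    simpa [PySem.Set.update, hadd] using ih (PySem.Set.add acc x)

-- ===== VERDICT (by name: the statement is the Claim_ definition above) =====
theorem generate_fault_map_spec : Claim_equal_generate_fault_map := by
  intro encoder block_index group weights _dom
  unfold Spec_generate_fault_map generate_fault_map generate_fault_map_alt
  have hfun : (fun (output : PySem.Dict String (List (Int × Int))) (t : Int × Int × Int × String) =>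
      let name := pvName encoder block_index group t.2.2.2
      let output := if output.contains name then output else output.insert name ([] : List (Int × Int))
      output.modify name [] (fun l => l ++ [(t.1, t.2.1)]))
      = fun output t => output.modify (pvName encoder block_index group t.2.2.2) [] (fun l => l ++ [(t.1, t.2.1)]) := by
    funext d t
    exact step_eq_modify d _ (t.1, t.2.1)
  rw [hfun]
  have hswap : weights.foldl (fun (d : PySem.Dict String (List (Int × Int))) t =>
        d.modify (pvName encoder block_index group t.2.2.2) [] (fun l => l ++ [(t.1, t.2.1)])) PySem.Dict.empty
      = (weights.map (fun t => (pvName encoder block_index group t.2.2.2, (t.1, t.2.1)))).foldl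
          (fun d p => d.modify p.1 [] (fun l => l ++ [p.2])) PySem.Dict.empty :=
    (List.foldl_map (f := fun t => (pvName encoder block_index group t.2.2.2, (t.1, t.2.1)))
      (g := fun d p => d.modify p.1 [] (fun l => l ++ [p.2])) (l := weights) (init := PySem.Dict.empty)).symm
  rw [hswap]
  have hnd : ((weights.map (fun t => (pvName encoder block_index group t.2.2.2, (t.1, t.2.1)))).foldl
      (fun d p => d.modify p.1 [] (fun l => l ++ [p.2])) PySem.Dict.empty).keys.Nodup := by
    apply PySem.Dict.nodup_keys_foldl_modify_key _ (fun (p : String × (Int × Int)) => p.1) []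
      (fun _ (p : String × (Int × Int)) => fun l => l ++ [p.2])
    simp
  rw [PySem.Dict.items_eq_map_keys _ hnd []]
  have hkeys : ((weights.map (fun t => (pvName encoder block_index group t.2.2.2, (t.1, t.2.1)))).foldl
      (fun d p => d.modify p.1 [] (fun l => l ++ [p.2])) PySem.Dict.empty).keys
      = (PySem.List.dedup (weights.map (fun t => t.2.2.2))).map (pvName encoder block_index group) := by
    rw [PySem.Dict.keys_foldl_modify_key _ (fun (p : String × (Int × Int)) => p.1) []
      (fun _ (p : String × (Int × Int)) => fun l => l ++ [p.2])]
    have h1 : (weights.map (fun t => (pvName encoder block_index group t.2.2.2, (t.1, t.2.1)))).map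
        (fun (p : String × (Int × Int)) => p.1)
        = (weights.map (fun t => t.2.2.2)).map (pvName encoder block_index group) := by
      simp [List.map_map, Function.comp_def]
    have h2 := set_update_map_inj (pvName encoder block_index group)
      (fun {a b} h => pvName_inj encoder block_index group h) (weights.map (fun t => t.2.2.2)) []
    simpa [h1, PySem.Dict.keys_empty, PySem.List.dedup, PySem.Set.ofList] using h2
  rw [hkeys, List.map_map]
  apply List.map_congr_left
  intro s _hs
  simp only [Function.comp_apply]
  refine congrArg (fun v => (pvName encoder block_index group s, v)) ?_
  have hval := PySem.Dict.getD_foldl_modify_append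
    (weights.map (fun t => (pvName encoder block_index group t.2.2.2, (t.1, t.2.1))))
    PySem.Dict.empty (pvName encoder block_index group s)
  rw [PySem.Dict.getD_empty] at hval
  rw [hval, List.filter_map, List.map_map]
  have hq : ∀ t ∈ weights, ((fun (p : String × (Int × Int)) => p.1 == pvName encoder block_index group s)
      ∘ (fun (t : Int × Int × Int × String) => (pvName encoder block_index group t.2.2.2, (t.1, t.2.1)))) t
      = (t.2.2.2 == s) := by
    intro t _
    simp only [Function.comp_apply, beq_eq_decide]
    exact decide_eq_decide.mpr
      ⟨fun hc => pvName_inj encoder block_index group hc, fun he => by rw [he]⟩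
  rw [List.filter_congr hq]
  simp [Function.comp_def]
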